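-- pv_equiv track=rewrite | github.com/Otavianovesz/autotabloide_ai | src/core/services/import_service.py | _check_duplicates_in_file
-- ===== SOURCE A (Python) =====
-- from typing import List, Dict, Any, Optional, Tuple
--
-- def _check_duplicates_in_file(rows: List[Dict[str, Any]], key_column: str) -> List[Tuple[int, str]]:
--     """
--     CENTURY CHECKLIST Item 66: Detecta duplicatas no arquivo.
--
--     Args:
--         rows: Lista de linhas
--         key_column: Coluna chave para verificar
--
--     Returns:
--         Lista de (linha, valor) duplicados
--     """
--     seen = {}
--     duplicates = []
--
--     for idx, row in enumerate(rows):
--         value = str(row.get(key_column, "")).strip().lower()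
--         if not value:
--             continue
--
--         if value in seen:
--             duplicates.append((idx + 1, value))  # +1 para linha humana
--         else:
--             seen[value] = idx + 1
--
--     return duplicates
-- ===== SOURCE B (Python) =====
-- def _check_duplicates_in_file(rows, key_column):
--     # Stage 1: normalize and keep only nonempty values, with 1-based line numbers.
--     pairs = [(v, i + 1) for i, row in enumerate(rows)
--              if (v := str(row.get(key_column, "")).strip().lower())]
--     # Stage 2: group line numbers by value.
--     groups = {}
--     for v, line in pairs:
--         groups[v] = groups.get(v, []) + [line]
--     # Stage 3: every occurrence after the first in its group is a duplicate;
--     # line numbers are distinct, so sorting by line restores the original row order.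
--     dups = [(line, v) for v, lines in groups.items() for line in lines[1:]]
--     return sorted(dups, key=lambda p: p[0])
-- ===== Notes on version B (the rewrite author's own statement) =====
-- stated objective: alternative
-- what changed: Replaces A's single stateful pass (seen-dict plus duplicate accumulator) by a staged group-by: normalize into (value, line) pairs, build a dict from each value to its ordered list of line numbers, emit every line after the first in its group, and sort the result by line number to restore row order.
import Mathlib
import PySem

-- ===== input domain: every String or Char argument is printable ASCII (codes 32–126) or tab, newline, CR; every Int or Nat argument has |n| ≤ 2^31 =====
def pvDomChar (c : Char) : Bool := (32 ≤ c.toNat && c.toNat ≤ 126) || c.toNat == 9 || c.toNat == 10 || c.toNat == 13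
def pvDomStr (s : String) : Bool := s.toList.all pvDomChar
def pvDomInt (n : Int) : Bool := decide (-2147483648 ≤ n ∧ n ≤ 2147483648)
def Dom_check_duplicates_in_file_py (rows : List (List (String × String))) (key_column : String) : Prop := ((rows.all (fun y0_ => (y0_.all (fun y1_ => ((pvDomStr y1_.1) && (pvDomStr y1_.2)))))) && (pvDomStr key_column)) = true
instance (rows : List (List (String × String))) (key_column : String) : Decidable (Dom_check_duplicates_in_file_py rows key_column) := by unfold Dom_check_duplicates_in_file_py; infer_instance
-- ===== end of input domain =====

-- B replaces A's single stateful seen-dict pass by a staged group-by: normalize into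
-- (value, line) pairs, group line numbers by value, emit every line after the first in
-- its group, and sort by line number; same return value, different algorithm.

-- shared normalization: str(row.get(key_column, "")).strip().lower()
def pvNorm (key_column : String) (row : List (String × String)) : String :=
  PySem.Str.lower (PySem.Str.strip ((PySem.Dict.mk row).getD key_column ""))

-- ===== PORT A =====
def check_duplicates_in_file_py (rows : List (List (String × String))) (key_column : String) : List (Int × String) :=
  ((PySem.List.enumerate rows 0).foldl
    (fun (st : PySem.Dict String Int × List (Int × String)) iv =>
      let value := pvNorm key_column iv.2
      if value = "" then st
      else if st.1.contains value then (st.1, st.2 ++ [(iv.1 + 1, value)])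
      else (st.1.insert value (iv.1 + 1), st.2))
    (PySem.Dict.empty, [])).2

-- ===== PORT B =====
def check_duplicates_in_file_py_alt (rows : List (List (String × String))) (key_column : String) : List (Int × String) :=
  -- stage 1: (value, line) pairs for the nonempty normalized values
  let pairs := (PySem.List.enumerate rows 0).filterMap
    (fun iv => let v := pvNorm key_column iv.2
               if v = "" then none else some (v, iv.1 + 1))
  -- stage 2: group line numbers by value (groups[v] = groups.get(v, []) + [line])
  let groups := pairs.foldl
    (fun (d : PySem.Dict String (List Int)) p => d.modify p.1 [] (· ++ [p.2]))
    PySem.Dict.empty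
  -- stage 3: all-but-first of each group, sorted back into line order
  let dups := groups.items.flatMap
    (fun kv => (PySem.List.slice kv.2 (some 1) none).map (fun line => (line, kv.1)))
  PySem.List.sorted dups (fun p => p.1) false

-- ===== PRECONDITION & SPEC =====
def Spec_check_duplicates_in_file_py (rows : List (List (String × String))) (key_column : String) (out : List (Int × String)) : Prop := out = check_duplicates_in_file_py_alt rows key_column
instance (rows : List (List (String × String))) (key_column : String) (out : List (Int × String)) : Decidable (Spec_check_duplicates_in_file_py rows key_column out) := by unfold Spec_check_duplicates_in_file_py; infer_instance

-- ===== CLAIM (what is proved, stated in full; the proofs are below) =====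
def Claim_equal_check_duplicates_in_file_py : Prop := ∀ (rows : List (List (String × String))) (key_column : String), Dom_check_duplicates_in_file_py rows key_column → Spec_check_duplicates_in_file_py rows key_column (check_duplicates_in_file_py rows key_column)

-- ===== LEMMAS AND PROOFS =====

-- the nonempty (value, line) pairs, as B's stage 1 computes them
def pvPairs (key_column : String) (rows : List (List (String × String))) (s : Int) : List (String × Int) :=
  (PySem.List.enumerate rows s).filterMap
    (fun iv => let v := pvNorm key_column iv.2
               if v = "" then none else some (v, iv.1 + 1))

-- reference result: the non-first occurrences, in pair order
def pvDup (pre : List String) (ps : List (String × Int)) : List (Int × String) :=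
  match ps with
  | [] => []
  | (v, l) :: rest => (if v ∈ pre then [(l, v)] else []) ++ pvDup (pre ++ [v]) rest

lemma pvA_eq_dup (key_column : String) (rs : List (List (String × String))) :
    ∀ (pre : List String) (seen : PySem.Dict String Int) (acc : List (Int × String)) (s : Int),
    (∀ v, seen.contains v = true ↔ v ∈ pre) →
    ((PySem.List.enumerate rs s).foldl
      (fun (st : PySem.Dict String Int × List (Int × String)) iv =>
        let value := pvNorm key_column iv.2
        if value = "" then st
        else if st.1.contains value then (st.1, st.2 ++ [(iv.1 + 1, value)])
        else (st.1.insert value (iv.1 + 1), st.2))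
      (seen, acc)).2
    = acc ++ pvDup pre (pvPairs key_column rs s) := by
  induction rs with
  | nil => intro pre seen acc s _; simp [pvPairs, pvDup]
  | cons r rest ih =>
    intro pre seen acc s hseen
    rw [PySem.List.enumerate_cons, List.foldl_cons]
    have hps : pvPairs key_column (r :: rest) s
        = (if pvNorm key_column r = "" then [] else [(pvNorm key_column r, s + 1)])
          ++ pvPairs key_column rest (s + 1) := by
      unfold pvPairs
      rw [PySem.List.enumerate_cons, List.filterMap_cons]
      by_cases h : pvNorm key_column r = "" <;> simp [h]
    set v := pvNorm key_column r with hv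
    by_cases hne : v = ""
    · simp only [hne, reduceIte]
      rw [ih pre seen acc (s + 1) hseen, hps]
      simp [hne]
    · by_cases hc : seen.contains v = true
      · have hmem : v ∈ pre := (hseen v).mp hc
        have hseen' : ∀ w, seen.contains w = true ↔ w ∈ pre ++ [v] := by
          intro w; rw [hseen w]
          constructor
          · exact fun h => List.mem_append_left _ h
          · intro h
            rcases List.mem_append.mp h with h | h
            · exact h
            · simp at h; subst h; exact hmem
        simp only [hne, hc, reduceIte]
        rw [ih (pre ++ [v]) seen (acc ++ [(s + 1, v)]) (s + 1) hseen', hps]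
        simp [pvDup, hne, hmem]
      · have hnmem : v ∉ pre := fun h => hc ((hseen v).mpr h)
        have hseen' : ∀ w, (seen.insert v (s + 1)).contains w = true ↔ w ∈ pre ++ [v] := by
          intro w
          rw [PySem.Dict.contains_insert]
          constructor
          · intro h
            rcases Bool.or_eq_true_iff.mp h with h | h
            · have : w = v := by simpa using h
              subst this; simp
            · exact List.mem_append_left _ ((hseen w).mp h)
          · intro h
            rcases List.mem_append.mp h with h | h
            · exact Bool.or_eq_true_iff.mpr (Or.inr ((hseen w).mpr h))
            · simp at h; subst h; simp
        simp only [hne, hc, reduceIte, Bool.not_eq_true] at *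
        simp only [Bool.false_eq_true, reduceIte]
        rw [ih (pre ++ [v]) (seen.insert v (s + 1)) acc (s + 1) hseen', hps]
        simp [pvDup, hnmem]

-- the duplicate pairs contributed by one group (B's stage 3, for one value)
def pvEmit (ps : List (String × Int)) (w : String) : List (Int × String) :=
  (((ps.filter (fun p => p.1 == w)).map Prod.snd).tail).map (fun m => (m, w))

-- B's stage-2+3 value before the final sort
def pvGroupDup (ps : List (String × Int)) : List (Int × String) :=
  (PySem.Set.ofList (ps.map Prod.fst)).flatMap (pvEmit ps)

lemma pvDup_snoc (p : String × Int) (qs : List (String × Int)) : ∀ pre,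
    pvDup pre (qs ++ [p]) = pvDup pre qs ++ (if p.1 ∈ pre ++ qs.map Prod.fst then [(p.2, p.1)] else []) := by
  induction qs with
  | nil => intro pre; simp [pvDup]
  | cons q rest ih =>
    intro pre
    obtain ⟨w, m⟩ := q
    simp only [List.cons_append, pvDup, List.map_cons, ih (pre ++ [w])]
    by_cases h : p.1 ∈ pre ++ [w] ++ rest.map Prod.fst
    · have h' : p.1 ∈ pre ++ w :: rest.map Prod.fst := by
        simp at h ⊢; tauto
      simp [h']
    · have h' : p.1 ∉ pre ++ w :: rest.map Prod.fst := by
        simp at h ⊢; tauto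
      simp [h']

lemma pvPermMid {α : Type} (a b c : List α) (e : α) :
    (a ++ (b ++ [e]) ++ c).Perm ((a ++ b ++ c) ++ [e]) := by
  have h1 : a ++ (b ++ [e]) ++ c = (a ++ b) ++ ([e] ++ c) := by simp
  have h2 : (a ++ b ++ c) ++ [e] = (a ++ b) ++ (c ++ [e]) := by simp
  rw [h1, h2]
  exact List.Perm.append_left _ List.perm_append_comm

lemma pvEmit_snoc_ne (qs : List (String × Int)) (v : String) (l : Int) (w : String) (hw : v ≠ w) :
    pvEmit (qs ++ [(v, l)]) w = pvEmit qs w := by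
  unfold pvEmit
  rw [List.filter_append]
  have : List.filter (fun p => p.1 == w) [(v, l)] = [] := by
    simp [hw]
  rw [this, List.append_nil]

lemma pvEmit_snoc_self (qs : List (String × Int)) (v : String) (l : Int) (hv : v ∈ qs.map Prod.fst) :
    pvEmit (qs ++ [(v, l)]) v = pvEmit qs v ++ [(l, v)] := by
  have hne : (qs.filter (fun p => p.1 == v)) ≠ [] := by
    obtain ⟨p, hp, hpv⟩ := List.mem_map.mp hv
    intro hnil
    have hmem : p ∈ qs.filter (fun p => p.1 == v) := List.mem_filter.mpr ⟨hp, by simp [hpv]⟩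
    simp [hnil] at hmem
  unfold pvEmit
  rw [List.filter_append]
  have h1 : List.filter (fun p => p.1 == v) [(v, l)] = [(v, l)] := by simp
  rw [h1, List.map_append,
      List.tail_append_of_ne_nil (by simpa using hne), List.map_append]
  simp

lemma pvGroupDup_perm (ps : List (String × Int)) : (pvDup [] ps).Perm (pvGroupDup ps) := by
  induction ps using List.reverseRecOn with
  | nil => simp [pvDup, pvGroupDup, PySem.Set.ofList]
  | append_singleton qs p ih =>
    obtain ⟨v, l⟩ := p
    rw [pvDup_snoc]
    simp only [List.nil_append]
    have hofl : PySem.Set.ofList ((qs ++ [(v, l)]).map Prod.fst)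
        = PySem.Set.add (PySem.Set.ofList (qs.map Prod.fst)) v := by
      simp [PySem.Set.ofList_eq_foldl]
    by_cases hv : v ∈ qs.map Prod.fst
    · have hm : v ∈ PySem.Set.ofList (qs.map Prod.fst) := (PySem.Set.mem_ofList _ _).mpr hv
      have hadd : PySem.Set.add (PySem.Set.ofList (qs.map Prod.fst)) v
          = PySem.Set.ofList (qs.map Prod.fst) := by
        simp [PySem.Set.add, hm]
      obtain ⟨s1, s2, hS⟩ := List.mem_iff_append.mp hm
      have hnd := PySem.Set.nodup_ofList (qs.map Prod.fst)
      rw [hS, List.nodup_append] at hnd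
      have hv1 : v ∉ s1 := fun h => hnd.2.2 v h v (List.mem_cons_self ..) rfl
      have hv2 : v ∉ s2 := (List.nodup_cons.mp hnd.2.1).1
      have hsplit : pvGroupDup (qs ++ [(v, l)])
          = s1.flatMap (pvEmit qs) ++ (pvEmit qs v ++ [(l, v)]) ++ s2.flatMap (pvEmit qs) := by
        unfold pvGroupDup
        rw [hofl, hadd, hS]
        simp only [List.flatMap_append, List.flatMap_cons]
        rw [List.flatMap_congr (fun w hw => pvEmit_snoc_ne qs v l w (by rintro rfl; exact hv1 hw)),
            List.flatMap_congr (fun w hw => pvEmit_snoc_ne qs v l w (by rintro rfl; exact hv2 hw)),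
            pvEmit_snoc_self qs v l hv]
        simp
      have hqs : pvGroupDup qs = s1.flatMap (pvEmit qs) ++ pvEmit qs v ++ s2.flatMap (pvEmit qs) := by
        unfold pvGroupDup
        rw [hS]
        simp
      rw [hsplit, if_pos hv]
      exact ((hqs ▸ ih).append_right _).trans (pvPermMid _ _ _ _).symm
    · have hnm : v ∉ PySem.Set.ofList (qs.map Prod.fst) := fun h => hv ((PySem.Set.mem_ofList _ _).mp h)
      have hadd : PySem.Set.add (PySem.Set.ofList (qs.map Prod.fst)) v
          = PySem.Set.ofList (qs.map Prod.fst) ++ [v] := by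
        simp [PySem.Set.add, hnm]
      have hvempty : pvEmit (qs ++ [(v, l)]) v = [] := by
        have hfil : qs.filter (fun p => p.1 == v) = [] := by
          rw [List.filter_eq_nil_iff]
          intro p hp hb
          exact hv (List.mem_map.mpr ⟨p, hp, by simpa using hb⟩)
        unfold pvEmit
        rw [List.filter_append, hfil]
        simp
      have hsplit : pvGroupDup (qs ++ [(v, l)]) = pvGroupDup qs := by
        unfold pvGroupDup
        rw [hofl, hadd, List.flatMap_append,
            List.flatMap_congr (fun w hw => pvEmit_snoc_ne qs v l w (by rintro rfl; exact hnm hw))]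
        simp [hvempty]
      rw [hsplit, if_neg hv]
      simpa using ih

lemma pvDup_mem_snd (q : Int × String) : ∀ (ps : List (String × Int)) pre, q ∈ pvDup pre ps → q.1 ∈ ps.map Prod.snd := by
  intro ps
  induction ps with
  | nil => intro pre h; simp [pvDup] at h
  | cons p rest ih =>
    intro pre h
    obtain ⟨v, l⟩ := p
    simp only [pvDup, List.mem_append] at h
    rcases h with h | h
    · rcases (by split at h <;> simp_all : q = (l, v)) with rfl
      simp
    · simpa using Or.inr (ih (pre ++ [v]) h)

lemma pvDup_pairwise (ps : List (String × Int)) (h : (ps.map Prod.snd).Pairwise (· < ·)) :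
    ∀ pre, (pvDup pre ps).Pairwise (fun a b => a.1 < b.1) := by
  induction ps with
  | nil => intro pre; simp [pvDup]
  | cons p rest ih =>
    obtain ⟨v, l⟩ := p
    simp only [List.map_cons, List.pairwise_cons] at h
    intro pre
    simp only [pvDup]
    rw [List.pairwise_append]
    refine ⟨?_, ih h.2 (pre ++ [v]), ?_⟩
    · split <;> simp
    · intro a ha b hb
      have hb' := pvDup_mem_snd b rest (pre ++ [v]) hb
      have ha' : a = (l, v) := by split at ha <;> simp_all
      subst ha'
      simpa using h.1 _ (by simpa using hb')

lemma pvPairs_snd_pairwise (key_column : String) (rs : List (List (String × String))) (s : Int) :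
    ((pvPairs key_column rs s).map Prod.snd).Pairwise (· < ·) := by
  unfold pvPairs
  rw [List.pairwise_map]
  apply List.Pairwise.filterMap
  · intro a b hab x hx y hy
    by_cases ha : pvNorm key_column a.2 = ""
    · simp [ha] at hx
    · by_cases hb : pvNorm key_column b.2 = ""
      · simp [hb] at hy
      · simp [ha, hb] at hx hy
        subst hx; subst hy
        simpa using hab
  · exact PySem.List.pairwise_lt_enumerate rs s

lemma pvB_eq_dup (rows : List (List (String × String))) (key_column : String) :
    check_duplicates_in_file_py_alt rows key_column = pvDup [] (pvPairs key_column rows 0) := by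
  have hsp := pvPairs_snd_pairwise key_column rows 0
  simp only [check_duplicates_in_file_py_alt]
  rw [show ((PySem.List.enumerate rows 0).filterMap
      (fun iv => let v := pvNorm key_column iv.2
                 if v = "" then none else some (v, iv.1 + 1))) = pvPairs key_column rows 0 from rfl]
  set ps := pvPairs key_column rows 0 with hps
  set G := ps.foldl (fun (d : PySem.Dict String (List Int)) p => d.modify p.1 [] (· ++ [p.2])) PySem.Dict.empty with hG
  have hkeys : G.keys = PySem.Set.ofList (ps.map Prod.fst) := by
    rw [hG, PySem.Dict.keys_foldl_modify_key]
    simp [PySem.Set.ofList_eq_foldl, PySem.Set.update, PySem.Dict.keys_empty]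
  have hnd : G.keys.Nodup := by
    rw [hkeys]; exact PySem.Set.nodup_ofList _
  have hgetD : ∀ v, G.getD v [] = (ps.filter (fun p => p.1 == v)).map Prod.snd := by
    intro v
    rw [hG, PySem.Dict.getD_foldl_modify_append]
    simp [PySem.Dict.getD_empty]
  have hflat : G.items.flatMap (fun kv => (PySem.List.slice kv.2 (some 1) none).map (fun line => (line, kv.1)))
      = pvGroupDup ps := by
    rw [PySem.Dict.items_eq_map_keys G hnd [], hkeys, List.flatMap_map]
    unfold pvGroupDup pvEmit
    congr 1
    funext v
    rw [PySem.List.slice_from_one, hgetD]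
  rw [hflat]
  exact PySem.List.sorted_eq_of_perm_of_pairwise_lt _ _ _ (pvGroupDup_perm ps) (pvDup_pairwise ps hsp [])

-- ===== VERDICT (by name: the statement is the Claim_ definition above) =====
theorem check_duplicates_in_file_py_spec : Claim_equal_check_duplicates_in_file_py := by
  intro rows key_column _
  unfold Spec_check_duplicates_in_file_py check_duplicates_in_file_py
  rw [pvA_eq_dup key_column rows [] PySem.Dict.empty [] 0
      (by intro v; simp [PySem.Dict.contains_empty]), pvB_eq_dup]
  simp
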